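-- pv_equiv track=rewrite | github.com/Amourspirit/ooo_uno_tmpl | template/_base_tmpl.py | _sort_dicts
-- ===== SOURCE A (Python) =====
-- from typing import Iterable, Tuple, List, Union, Optional
--
-- def _sort_dicts(lst: List[dict], sort_key: str) -> List[dict]:
--     """
--     Sort a list of Dictionaries
--
--     Args:
--         lst (List[dict]): List of dictionaries to sort
--         sort_key (str): Key of dictionary used for sorting
--
--     Returns:
--         List[dict]: Sorted list of dictionaries.
--     """
--     if len(lst) == 0:
--         return lst
--     keys: List[str] = []
--     _result: List[dict] = []
--     for i, itm in enumerate(lst):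
--         keys.append((itm[sort_key], i))
--     keys.sort()
--     for k in keys:
--         _result.append(lst[k[1]])
--     return _result
-- ===== SOURCE B (Python) =====
-- def _sort_dicts(lst, sort_key):
--     """Stable insertion sort by sort_key: each dict is inserted into the
--     already-sorted result before the first entry with a strictly greater key,
--     so equal keys keep their original order."""
--     result = []
--     for itm in lst:
--         k = itm[sort_key]
--         i = 0
--         while i < len(result) and result[i][sort_key] <= k:
--             i += 1
--         result.insert(i, itm)
--     return result
-- ===== Notes on version B (the rewrite author's own statement) =====
-- stated objective: alternative
-- what changed: B replaces A's decorate-sort-undecorate (build a (value, index) tuple list, call list.sort, reconstruct by index) with a hand-written stable insertion sort that inserts each dict directly into the growing result before the first strictly greater key; no tuple decoration, no index table, no built-in sort.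
import Mathlib
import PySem

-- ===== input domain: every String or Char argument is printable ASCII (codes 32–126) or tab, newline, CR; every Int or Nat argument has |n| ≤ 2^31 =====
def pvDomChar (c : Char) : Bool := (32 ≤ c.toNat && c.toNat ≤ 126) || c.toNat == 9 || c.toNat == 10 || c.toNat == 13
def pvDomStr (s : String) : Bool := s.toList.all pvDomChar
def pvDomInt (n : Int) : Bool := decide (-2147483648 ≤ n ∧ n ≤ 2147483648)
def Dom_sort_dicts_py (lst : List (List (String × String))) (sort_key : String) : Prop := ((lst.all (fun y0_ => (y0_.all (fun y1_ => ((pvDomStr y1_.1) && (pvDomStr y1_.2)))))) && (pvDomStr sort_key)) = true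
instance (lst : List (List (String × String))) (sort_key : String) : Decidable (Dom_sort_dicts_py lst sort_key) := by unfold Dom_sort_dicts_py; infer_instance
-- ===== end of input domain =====

-- ===== PORT A =====
-- B replaces A's decorate-sort-undecorate with a hand-written stable insertion sort (alternative algorithm, not faster).
-- dict access d[k] on the association-list encoding: first match; 'none' is Python's KeyError (excluded by Pre_)
def pvDGet (d : List (String × String)) (k : String) : Option String := d.lookup k

def sort_dicts_py (lst : List (List (String × String))) (sort_key : String) : List (List (String × String)) :=
  if lst.length = 0 then lst
  else
    -- keys.append((itm[sort_key], i)); KeyError (pvDGet = none) is excluded by Pre_, the default is never read there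
    let keys : List (String × Int) :=
      (PySem.List.enumerate lst).foldl (fun ks p => ks ++ [((pvDGet p.2 sort_key).getD "", p.1)]) []
    -- keys.sort(): tuple comparison
    let skeys := PySem.List.sorted2 keys Prod.fst Prod.snd
    -- for k in keys: _result.append(lst[k[1]]); the index k.2 is always in range
    skeys.foldl (fun r k => r ++ [(PySem.List.pyGet? lst k.2).getD []]) []

-- ===== PORT B =====
-- the while loop of B: scan past every entry whose key is ≤ itm's key, insert itm there
def pvInsertSorted (sort_key : String) (itm : List (String × String)) :
    List (List (String × String)) → List (List (String × String))
  | [] => [itm]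
  | d :: rest =>
      if (pvDGet d sort_key).getD "" ≤ (pvDGet itm sort_key).getD "" then
        d :: pvInsertSorted sort_key itm rest
      else itm :: d :: rest

def sort_dicts_py_alt (lst : List (List (String × String))) (sort_key : String) : List (List (String × String)) :=
  lst.foldl (fun result itm => pvInsertSorted sort_key itm result) []

-- ===== PRECONDITION & SPEC =====
-- Pre_ excludes exactly the inputs where Python A raises KeyError: some dict in lst lacks sort_key.
def Pre_sort_dicts_py (lst : List (List (String × String))) (sort_key : String) : Prop :=
  ∀ d ∈ lst, (pvDGet d sort_key).isSome = true
instance (lst : List (List (String × String))) (sort_key : String) : Decidable (Pre_sort_dicts_py lst sort_key) := by unfold Pre_sort_dicts_py; infer_instance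
def pvWitness_sort_dicts_py : (List (List (String × String))) × String :=
  ([[("k", "b"), ("v", "1")], [("k", "a")]], "k")
def Spec_sort_dicts_py (lst : List (List (String × String))) (sort_key : String) (out : List (List (String × String))) : Prop := out = sort_dicts_py_alt lst sort_key
instance (lst : List (List (String × String))) (sort_key : String) (out : List (List (String × String))) : Decidable (Spec_sort_dicts_py lst sort_key out) := by unfold Spec_sort_dicts_py; infer_instance

-- ===== CLAIM (what is proved, stated in full; the proofs are below) =====
def Claim_equal_sort_dicts_py : Prop := ∀ (lst : List (List (String × String))) (sort_key : String), Dom_sort_dicts_py lst sort_key → Pre_sort_dicts_py lst sort_key → Spec_sort_dicts_py lst sort_key (sort_dicts_py lst sort_key)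

-- ===== LEMMAS AND PROOFS =====

-- B's insertion step is insertBy with the strict-less comparator (≤ to continue ↔ ¬ <)
theorem pvInsertSorted_eq_insertBy (sk : String) (itm : List (String × String))
    (ys : List (List (String × String))) :
    pvInsertSorted sk itm ys
      = PySem.List.insertBy
          (fun a c => decide ((pvDGet a sk).getD "" < (pvDGet c sk).getD "")) itm ys := by
  induction ys with
  | nil => rfl
  | cons d rest ih =>
    simp only [pvInsertSorted, PySem.List.insertBy, ih]
    by_cases h : (pvDGet d sk).getD "" ≤ (pvDGet itm sk).getD ""
    · simp [h, not_lt.mpr h]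
    · simp [h, not_le.mp h]

-- B is the stable insertion sort, i.e. PySem's sorted with the key function
theorem pv_alt_eq_sorted (lst : List (List (String × String))) (sk : String) :
    sort_dicts_py_alt lst sk
      = PySem.List.sorted lst (fun d => (pvDGet d sk).getD "") false := by
  rw [PySem.List.sorted_eq_foldl_insertBy]
  unfold sort_dicts_py_alt
  congr 1
  funext r itm
  exact pvInsertSorted_eq_insertBy sk itm r

-- insertBy only compares x with members of ys, so pointwise-equal comparators agree
theorem pv_insertBy_congr {α : Type} (b1 b2 : α → α → Bool) (x : α) (ys : List α)
    (h : ∀ y ∈ ys, b1 x y = b2 x y) :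
    PySem.List.insertBy b1 x ys = PySem.List.insertBy b2 x ys := by
  induction ys with
  | nil => rfl
  | cons y ys ih =>
    have hy := h y (List.mem_cons_self)
    simp only [PySem.List.insertBy, hy]
    split
    · rfl
    · exact congrArg (y :: ·) (ih (fun z hz => h z (List.mem_cons_of_mem _ hz)))

-- insertBy commutes with map when the comparator factors through the map
theorem pv_map_insertBy {α β : Type} (g : α → β) (b : β → β → Bool) (x : α) (ys : List α) :
    (PySem.List.insertBy (fun a c => b (g a) (g c)) x ys).map g
      = PySem.List.insertBy b (g x) (ys.map g) := by
  induction ys with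
  | nil => rfl
  | cons y ys ih =>
    simp only [PySem.List.insertBy, List.map_cons]
    split
    · simp
    · simpa using ih

theorem pv_foldl_insertBy_map {α β κ : Type} [LT κ] [DecidableLT κ]
    (g : α → β) (k : β → κ) (xs : List α) (acc : List α) :
    ((xs.foldl (fun acc x => PySem.List.insertBy (fun a c => decide (k (g a) < k (g c))) x acc) acc).map g)
      = (xs.map g).foldl (fun acc y => PySem.List.insertBy (fun a c => decide (k a < k c)) y acc) (acc.map g) := by
  induction xs generalizing acc with
  | nil => rfl
  | cons x xs ih =>
    simp only [List.foldl_cons, List.map_cons]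
    rw [ih, pv_map_insertBy g (fun a c => decide (k a < k c)) x acc]

-- decorate-sort commutes with the decoration: sorted(map g xs, key=k) = map g (sorted xs, key=k∘g)
theorem pv_sorted_map {α β κ : Type} [LT κ] [DecidableLT κ] (g : α → β) (k : β → κ) (xs : List α) :
    PySem.List.sorted (xs.map g) k false = (PySem.List.sorted xs (fun x => k (g x)) false).map g := by
  rw [PySem.List.sorted_eq_foldl_insertBy, PySem.List.sorted_eq_foldl_insertBy,
    pv_foldl_insertBy_map g k xs []]
  rfl

-- tuple sort whose second component is strictly increasing is the stable sort by the first component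
theorem pv_sorted2_eq_sorted {α κ₁ κ₂ : Type} [LT κ₁] [DecidableLT κ₁] [LinearOrder κ₂]
    (xs : List α) (k1 : α → κ₁) (k2 : α → κ₂) (hpw : xs.Pairwise (fun a b => k2 a < k2 b)) :
    PySem.List.sorted2 xs k1 k2 false = PySem.List.sorted xs k1 false := by
  rw [PySem.List.sorted_eq_foldl_insertBy]
  show xs.foldl (fun acc x => PySem.List.insertBy
      (fun a b => decide (k1 a < k1 b) || (!decide (k1 b < k1 a) && decide (k2 a < k2 b))) x acc) []
    = xs.foldl (fun acc x => PySem.List.insertBy (fun a b => decide (k1 a < k1 b)) x acc) []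
  have main : ∀ (xs : List α) (acc : List α),
      xs.Pairwise (fun a b => k2 a < k2 b) →
      (∀ x ∈ xs, ∀ y ∈ acc, k2 y < k2 x) →
      xs.foldl (fun acc x => PySem.List.insertBy
          (fun a b => decide (k1 a < k1 b) || (!decide (k1 b < k1 a) && decide (k2 a < k2 b))) x acc) acc
        = xs.foldl (fun acc x => PySem.List.insertBy (fun a b => decide (k1 a < k1 b)) x acc) acc := by
    intro xs
    induction xs with
    | nil => intro acc _ _; rfl
    | cons x xs ih =>
      intro acc hpw hacc
      simp only [List.foldl_cons]
      have hcongr : PySem.List.insertBy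
          (fun a b => decide (k1 a < k1 b) || (!decide (k1 b < k1 a) && decide (k2 a < k2 b))) x acc
          = PySem.List.insertBy (fun a b => decide (k1 a < k1 b)) x acc := by
        apply pv_insertBy_congr
        intro y hy
        have h2 : ¬ (k2 x < k2 y) := not_lt.mpr (le_of_lt (hacc x List.mem_cons_self y hy))
        simp [h2]
      rw [hcongr]
      apply ih (PySem.List.insertBy (fun a b => decide (k1 a < k1 b)) x acc) hpw.of_cons
      intro z hz y hy
      rw [PySem.List.mem_insertBy] at hy
      rcases hy with h | h
      · subst h; exact (List.pairwise_cons.mp hpw).1 z hz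
      · exact hacc z (List.mem_cons_of_mem _ hz) y h
  exact main xs [] hpw (by simp)

-- ===== VERDICT (by name: the statement is the Claim_ definition above) =====
theorem sort_dicts_py_spec : Claim_equal_sort_dicts_py := by
  intro lst sort_key _ _
  unfold Spec_sort_dicts_py
  rw [pv_alt_eq_sorted]
  unfold sort_dicts_py
  by_cases hnil : lst.length = 0
  · rw [List.length_eq_zero_iff] at hnil
    subst hnil
    rfl
  · simp only [hnil, if_false]
    set key : List (String × String) → String := fun d => (pvDGet d sort_key).getD "" with hkey
    set g : Int × List (String × String) → String × Int := fun p => (key p.2, p.1) with hg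
    have hkeys : ((PySem.List.enumerate lst).foldl
        (fun ks p => ks ++ [((pvDGet p.2 sort_key).getD "", p.1)]) [])
        = (PySem.List.enumerate lst).map g := by
      rw [PySem.List.foldl_append_singleton_eq_map]
      simp only [List.nil_append]
      rfl
    rw [hkeys]
    have hpw : ((PySem.List.enumerate lst).map g).Pairwise (fun a b => a.2 < b.2) := by
      rw [List.pairwise_map]
      exact PySem.List.pairwise_lt_enumerate lst 0
    rw [pv_sorted2_eq_sorted _ Prod.fst Prod.snd hpw]
    rw [PySem.List.foldl_append_singleton_eq_map]
    simp only [List.nil_append]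
    rw [pv_sorted_map g Prod.fst]
    rw [List.map_map]
    have hstep : ∀ p ∈ PySem.List.sorted (PySem.List.enumerate lst) (fun p => key p.2) false,
        ((fun k => (PySem.List.pyGet? lst k.2).getD []) ∘ g) p = p.2 := by
      intro p hp
      have hmem : p ∈ PySem.List.enumerate lst := (PySem.List.mem_sorted _ _ _ _).mp hp
      rcases (PySem.List.mem_enumerate_iff _ _ _).mp hmem with ⟨k, hk, rfl⟩
      simp [g, hk]
    rw [List.map_congr_left hstep]
    have hback : List.map Prod.snd (PySem.List.sorted (PySem.List.enumerate lst) (fun p => key p.2) false)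
        = PySem.List.sorted lst key false := by
      have := pv_sorted_map (Prod.snd : Int × List (String × String) → List (String × String)) key (PySem.List.enumerate lst)
      rw [← this, PySem.List.map_snd_enumerate]
    rw [hback]
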